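-- pv_equiv track=rewrite | github.com/alandao/acmpractice | tree_sum.py | splitInputIntoList
-- ===== SOURCE A (Python) =====
-- def splitInputIntoList(xs, prev_char):
--     xs = list(filter(lambda x: x != ' ' and x != '\n', xs))
--     head, *tail = xs
--     if tail == []:
--         return head
--     if prev_char == ')' and  head.isdigit():
--         return '\n' + head + splitInputIntoList(tail, head)
--     return head + splitInputIntoList(tail, head)
-- ===== SOURCE B (Python) =====
-- def splitInputIntoList(xs, prev_char):
--     # One pass, iterative: filter once, thread a running `prev` over all but the
--     # final element (the final element just terminates the output, as in A).
--     cs = [x for x in xs if x != ' ' and x != '\n']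
--     if not cs:
--         raise ValueError("empty input")
--     parts = []
--     prev = prev_char
--     for c in cs[:-1]:
--         if prev == ')' and c.isdigit():
--             parts.append('\n')
--         parts.append(c)
--         prev = c
--     parts.append(cs[-1])
--     return ''.join(parts)
-- ===== Notes on version B (the rewrite author's own statement) =====
-- stated objective: faster
-- what changed: Replaced A's recursion that re-filters the remaining list at every level with a single filter followed by one iterative pass threading a running prev and joining the collected parts.
import Mathlib
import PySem

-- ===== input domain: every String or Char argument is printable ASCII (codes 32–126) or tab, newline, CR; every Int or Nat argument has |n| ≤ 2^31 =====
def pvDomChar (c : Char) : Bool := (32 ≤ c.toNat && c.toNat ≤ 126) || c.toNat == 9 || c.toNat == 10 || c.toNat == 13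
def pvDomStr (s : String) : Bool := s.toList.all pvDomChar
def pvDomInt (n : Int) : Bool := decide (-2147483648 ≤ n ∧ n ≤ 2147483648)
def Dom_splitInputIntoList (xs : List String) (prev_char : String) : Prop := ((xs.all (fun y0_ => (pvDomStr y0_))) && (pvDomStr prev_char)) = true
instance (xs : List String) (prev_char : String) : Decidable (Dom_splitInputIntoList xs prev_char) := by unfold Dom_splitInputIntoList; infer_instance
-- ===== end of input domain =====

-- B replaces A's recursion that re-filters and re-concatenates at every level by a single
-- filter plus one iterative pass with a running `prev` (objective: faster, measured); return
-- values agree on Pre_ (A raises ValueError when every element is ' ' or '\n', excluded).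


-- ===== PORT A =====
def splitInputIntoList (xs : List String) (prev_char : String) : String :=
  match h : xs.filter (fun x => x != " " && x != "\n") with
  | [] => ""          -- Python raises ValueError here (unpacking an empty list); excluded by Pre_
  | head :: tail =>
    if tail = [] then head
    else if prev_char = ")" ∧ PySem.Str.strIsdigit head then
      "\n" ++ head ++ splitInputIntoList tail head
    else head ++ splitInputIntoList tail head
termination_by xs.length
decreasing_by
  all_goals
    have hle : (xs.filter (fun x => x != " " && x != "\n")).length ≤ xs.length :=
      List.length_filter_le _ _
    rw [h] at hle; simp at hle; omega

-- ===== PORT B =====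
def splitInputIntoList_alt (xs : List String) (prev_char : String) : String :=
  let cs := xs.filter (fun x => x != " " && x != "\n")
  if hcs : cs = [] then ""   -- Python raises ValueError here; excluded by Pre_
  else
    let res := cs.dropLast.foldl
      (fun (acc : List String × String) c =>
        ((if acc.2 = ")" ∧ PySem.Str.strIsdigit c then acc.1 ++ ["\n", c] else acc.1 ++ [c]), c))
      ([], prev_char)
    PySem.Str.join "" (res.1 ++ [cs.getLast hcs])

-- ===== PRECONDITION & SPEC =====
-- Pre_ excludes exactly the inputs where every element is ' ' or '\n' (the filtered list is
-- empty), on which A raises ValueError.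
def Pre_splitInputIntoList (xs : List String) (prev_char : String) : Prop :=
  ∃ x ∈ xs, x ≠ " " ∧ x ≠ "\n"
instance (xs : List String) (prev_char : String) : Decidable (Pre_splitInputIntoList xs prev_char) := by
  unfold Pre_splitInputIntoList; infer_instance

def pvWitness_splitInputIntoList : List String × String := (["(", "12", ")", "3"], "x")

def Spec_splitInputIntoList (xs : List String) (prev_char : String) (out : String) : Prop := out = splitInputIntoList_alt xs prev_char
instance (xs : List String) (prev_char : String) (out : String) : Decidable (Spec_splitInputIntoList xs prev_char out) := by unfold Spec_splitInputIntoList; infer_instance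

-- ===== CLAIM (what is proved, stated in full; the proofs are below) =====
def Claim_equal_splitInputIntoList : Prop := ∀ (xs : List String) (prev_char : String), Dom_splitInputIntoList xs prev_char → Pre_splitInputIntoList xs prev_char → Spec_splitInputIntoList xs prev_char (splitInputIntoList xs prev_char)

-- ===== LEMMAS AND PROOFS =====

-- the shared per-element decoration, as a pure function on the filtered list (proof device)
def pvCore (prev : String) : List String → String
  | [] => ""
  | [a] => a
  | a :: b :: rest =>
    (if prev = ")" ∧ PySem.Str.strIsdigit a then "\n" ++ a else a) ++ pvCore a (b :: rest)

lemma join_empty_cons (a : String) (l : List String) :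
    PySem.Str.join "" (a :: l) = a ++ PySem.Str.join "" l := by
  apply String.toList_injective
  cases l with
  | nil => simp [PySem.Str.toList_join, PySem.Chars.join_singleton, PySem.Chars.join_nil]
  | cons d rest => simp [PySem.Str.toList_join, PySem.Chars.join_cons_cons]

-- A equals pvCore on the (once-)filtered list
lemma A_eq_core : ∀ (n : Nat) (xs : List String), xs.length ≤ n → ∀ prev,
    splitInputIntoList xs prev = pvCore prev (xs.filter (fun x => x != " " && x != "\n")) := by
  intro n
  induction n with
  | zero =>
    intro xs hlen prev
    have : xs = [] := List.eq_nil_of_length_eq_zero (Nat.le_zero.mp hlen)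
    subst this
    rw [splitInputIntoList]
    rfl
  | succ n ih =>
    intro xs hlen prev
    rw [splitInputIntoList]
    cases h : xs.filter (fun x => x != " " && x != "\n") with
    | nil => rfl
    | cons head tail =>
      have htail : tail.filter (fun x => x != " " && x != "\n") = tail := by
        apply List.filter_eq_self.mpr
        intro x hx
        have : x ∈ xs.filter (fun x => x != " " && x != "\n") := by
          rw [h]; exact List.mem_cons_of_mem _ hx
        exact (List.mem_filter.mp this).2
      have hlt : tail.length ≤ n := by
        have hle : (xs.filter (fun x => x != " " && x != "\n")).length ≤ xs.length :=
          List.length_filter_le _ _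
        rw [h] at hle; simp at hle; omega
      cases tail with
      | nil => simp [pvCore]
      | cons b rest =>
        have hrec := ih (b :: rest) hlt head
        rw [htail] at hrec
        show (if (b :: rest) = [] then head
          else if prev = ")" ∧ PySem.Str.strIsdigit head = true then
            "\n" ++ head ++ splitInputIntoList (b :: rest) head
          else head ++ splitInputIntoList (b :: rest) head) = pvCore prev (head :: b :: rest)
        rw [if_neg (by simp : ¬(b :: rest = []))]
        simp only [pvCore, hrec]
        split_ifs with hc
        · rfl
        · rfl

-- shifting the accumulated parts out of B's fold
lemma foldl_parts (l : List String) (acc : List String) (pr : String) :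
    l.foldl (fun (acc : List String × String) c =>
        ((if acc.2 = ")" ∧ PySem.Str.strIsdigit c then acc.1 ++ ["\n", c] else acc.1 ++ [c]), c))
      (acc, pr)
    = (acc ++ (l.foldl (fun (acc : List String × String) c =>
        ((if acc.2 = ")" ∧ PySem.Str.strIsdigit c then acc.1 ++ ["\n", c] else acc.1 ++ [c]), c))
      ([], pr)).1,
       (l.foldl (fun (acc : List String × String) c =>
        ((if acc.2 = ")" ∧ PySem.Str.strIsdigit c then acc.1 ++ ["\n", c] else acc.1 ++ [c]), c))
      ([], pr)).2) := by
  induction l generalizing acc pr with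
  | nil => simp
  | cons a l ih =>
    simp only [List.foldl_cons]
    rw [ih, ih (if pr = ")" ∧ PySem.Str.strIsdigit a then [] ++ ["\n", a] else [] ++ [a])]
    split_ifs <;> simp

-- B's body equals pvCore on a nonempty list
lemma B_eq_core : ∀ (l : List String) (hl : l ≠ []) (prev : String),
    PySem.Str.join ""
      ((l.dropLast.foldl
        (fun (acc : List String × String) c =>
          ((if acc.2 = ")" ∧ PySem.Str.strIsdigit c then acc.1 ++ ["\n", c] else acc.1 ++ [c]), c))
        ([], prev)).1 ++ [l.getLast hl])
    = pvCore prev l := by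
  intro l
  induction l with
  | nil => intro hl; exact absurd rfl hl
  | cons a l ih =>
    intro _ prev
    cases l with
    | nil =>
      simp [pvCore, join_empty_cons]
      apply String.toList_injective
      simp [PySem.Str.toList_join, PySem.Chars.join_nil]
    | cons b rest =>
      have hbl : b :: rest ≠ [] := by simp
      have ihr := ih hbl a
      have hdrop : (a :: b :: rest).dropLast = a :: (b :: rest).dropLast := by
        simp [List.dropLast]
      have hlast : (a :: b :: rest).getLast (by simp) = (b :: rest).getLast hbl := by
        simp [List.getLast]
      rw [hdrop]
      simp only [List.foldl_cons]
      rw [foldl_parts, hlast]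
      simp only [pvCore, ← ihr]
      split_ifs with hc <;>
        simp [join_empty_cons, String.append_assoc]

-- ===== VERDICT (by name: the statement is the Claim_ definition above) =====
theorem splitInputIntoList_spec : Claim_equal_splitInputIntoList := by
  intro xs prev_char _ hpre
  unfold Spec_splitInputIntoList splitInputIntoList_alt
  have hne : xs.filter (fun x => x != " " && x != "\n") ≠ [] := by
    obtain ⟨x, hx, h1, h2⟩ := hpre
    intro hnil
    have : x ∈ xs.filter (fun x => x != " " && x != "\n") := by
      apply List.mem_filter.mpr
      exact ⟨hx, by simp [h1, h2]⟩
    rw [hnil] at this; exact absurd this (List.not_mem_nil)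
  simp only [hne, dite_false]
  rw [A_eq_core xs.length xs le_rfl prev_char, B_eq_core _ hne prev_char]
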